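-- pv_equiv track=rewrite | github.com/Mishrasubha/Codeforces-Training-sheet | codeforces/Q1.py | findwidth
-- ===== SOURCE A (Python) =====
-- def findwidth(n,h,arr):
--     w = 0
--     for i in range(n):
--         if arr[i] > h:
--             w = w+2
--         else:
--             w = w+1
--     return w
-- ===== SOURCE B (Python) =====
-- def _upper_bound(t, h):
--     # index of first element > h in sorted t, i.e. count of elements <= h
--     lo, hi = 0, len(t)
--     while lo < hi:
--         mid = (lo + hi) // 2
--         if t[mid] <= h:
--             lo = mid + 1
--         else:
--             hi = mid
--     return lo
--
--
-- def findwidth(n, h, arr):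
--     t = sorted(arr[i] for i in range(n))
--     return 2 * len(t) - _upper_bound(t, h)
-- ===== Notes on version B (the rewrite author's own statement) =====
-- stated objective: alternative
-- what changed: B sorts the first n elements and finds the count of elements <= h by a hand-written binary search (upper bound), returning 2*n minus that count, instead of A's linear accumulator loop adding 1 or 2 per element.
import Mathlib
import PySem

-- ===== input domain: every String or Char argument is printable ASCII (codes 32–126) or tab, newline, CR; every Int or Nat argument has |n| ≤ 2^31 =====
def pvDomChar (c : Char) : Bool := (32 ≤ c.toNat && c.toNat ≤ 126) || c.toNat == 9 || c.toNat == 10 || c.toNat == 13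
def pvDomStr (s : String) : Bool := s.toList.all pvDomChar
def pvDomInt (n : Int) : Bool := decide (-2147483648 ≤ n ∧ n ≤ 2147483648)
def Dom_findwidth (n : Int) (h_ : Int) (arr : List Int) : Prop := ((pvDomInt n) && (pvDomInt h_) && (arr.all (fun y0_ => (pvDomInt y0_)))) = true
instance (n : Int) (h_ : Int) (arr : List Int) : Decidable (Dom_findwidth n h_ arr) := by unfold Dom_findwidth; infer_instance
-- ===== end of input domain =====

-- B sorts the first n elements and binary-searches the count of elements ≤ h (hand-written
-- upper bound), returning 2*n - count, instead of A's linear 1-or-2 accumulator loop.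

-- ===== PORT A =====
-- loop 'for i in range(n): w += 2 if arr[i] > h else 1'; arr[i] via pyGetD, exact under Pre_
def findwidth (n : Int) (h_ : Int) (arr : List Int) : Int :=
  (PySem.List.pyRange 0 n 1).foldl
    (fun w i => if PySem.List.pyGetD arr i 0 > h_ then w + 2 else w + 1) 0

-- ===== PORT B =====
-- _upper_bound's while loop: binary search for the first index with t[mid] > h
def ubGo (t : List Int) (h_ : Int) (lo hi : Int) : Int :=
  if hlt : lo < hi then
    let mid := PySem.Int.floordiv (lo + hi) 2
    if PySem.List.pyGetD t mid 0 ≤ h_ then ubGo t h_ (mid + 1) hi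
    else ubGo t h_ lo mid
  else lo
termination_by (hi - lo).toNat
decreasing_by
  · have hm : PySem.Int.floordiv (lo + hi) 2 = (lo + hi) / 2 :=
      PySem.Int.floordiv_eq_ediv_of_pos (by omega)
    simp only [hm]; omega
  · have hm : PySem.Int.floordiv (lo + hi) 2 = (lo + hi) / 2 :=
      PySem.Int.floordiv_eq_ediv_of_pos (by omega)
    simp only [hm]; omega

def findwidth_alt (n : Int) (h_ : Int) (arr : List Int) : Int :=
  let t := PySem.List.sorted ((PySem.List.pyRange 0 n 1).map
    (fun i => PySem.List.pyGetD arr i 0)) (fun x => x) false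
  2 * (t.length : Int) - ubGo t h_ 0 (t.length : Int)

-- ===== PRECONDITION & SPEC =====
-- Pre_ excludes exactly the inputs where A raises IndexError: n beyond the length of arr.
def Pre_findwidth (n : Int) (h_ : Int) (arr : List Int) : Prop := n ≤ (arr.length : Int)
instance (n : Int) (h_ : Int) (arr : List Int) : Decidable (Pre_findwidth n h_ arr) := by unfold Pre_findwidth; infer_instance
def pvWitness_findwidth : Int × Int × List Int := (2, 0, [1, -1])

def Spec_findwidth (n : Int) (h_ : Int) (arr : List Int) (out : Int) : Prop := out = findwidth_alt n h_ arr
instance (n : Int) (h_ : Int) (arr : List Int) (out : Int) : Decidable (Spec_findwidth n h_ arr out) := by unfold Spec_findwidth; infer_instance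

-- ===== CLAIM (what is proved, stated in full; the proofs are below) =====
def Claim_equal_findwidth : Prop := ∀ (n : Int) (h_ : Int) (arr : List Int), Dom_findwidth n h_ arr → Pre_findwidth n h_ arr → Spec_findwidth n h_ arr (findwidth n h_ arr)

-- ===== LEMMAS AND PROOFS =====

-- A's loop equals 2·m − #{elements ≤ h in the prefix}
theorem findwidth_loop_eq (h_ : Int) (arr : List Int) (m : Nat) (hm : m ≤ arr.length) :
    (PySem.List.pyRange 0 m 1).foldl
      (fun w i => if PySem.List.pyGetD arr i 0 > h_ then w + 2 else w + 1) 0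
    = 2 * ((arr.take m).length : Int)
      - ((arr.take m).countP (fun x => decide (x ≤ h_)) : Int) := by
  induction m with
  | zero => simp
  | succ k ih =>
      have hk : k ≤ arr.length := Nat.le_of_succ_le hm
      have hklt : k < arr.length := hm
      have hsplit : PySem.List.pyRange 0 ((k : Int) + 1) 1
          = PySem.List.pyRange 0 (k : Int) 1 ++ [(k : Int)] :=
        PySem.List.pyRange_one_succ_right (by exact_mod_cast Nat.zero_le k)
      have hcast : ((Nat.succ k : Nat) : Int) = (k : Int) + 1 := by push_cast; ring
      rw [hcast, hsplit, List.foldl_append, ih hk]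
      have hget : PySem.List.pyGetD arr (k : Int) 0 = arr[k] := by
        rw [PySem.List.pyGetD_natCast]; simp [List.getD, hklt]
      have htake : arr.take (k + 1) = arr.take k ++ [arr[k]] :=
        by rw [← List.take_concat_get (h := hklt)]; simp [List.concat_eq_append]
      simp only [List.foldl, hget, htake, List.countP_append, List.length_append,
        List.countP_singleton, List.length_singleton]
      by_cases hc : arr[k] > h_ <;> simp [hc, not_le.mpr, not_lt.mp] <;> omega

-- the binary search computes countP (· ≤ h) on a sorted list
theorem ubGo_eq (t : List Int) (h_ : Int) (lo hi : Int)
    (h0 : 0 ≤ lo) (hle : lo ≤ hi) (hhi : hi ≤ (t.length : Int))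
    (hsorted : t.Pairwise (· ≤ ·))
    (hlow : ∀ j : Nat, j < lo.toNat → t.getD j 0 ≤ h_)
    (hhigh : ∀ j : Nat, hi.toNat ≤ j → j < t.length → h_ < t.getD j 0) :
    ubGo t h_ lo hi = (t.countP (fun x => decide (x ≤ h_)) : Int) := by
  by_cases hlt : lo < hi
  · have hm : PySem.Int.floordiv (lo + hi) 2 = (lo + hi) / 2 :=
      PySem.Int.floordiv_eq_ediv_of_pos (by omega)
    have hmlo : lo ≤ PySem.Int.floordiv (lo + hi) 2 := by rw [hm]; omega
    have hmhi : PySem.Int.floordiv (lo + hi) 2 < hi := by rw [hm]; omega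
    set mid : Int := PySem.Int.floordiv (lo + hi) 2 with hmid
    have hmlen : mid.toNat < t.length := by omega
    have hget : PySem.List.pyGetD t mid 0 = t[mid.toNat]'hmlen := by
      have h1 : mid = ((mid.toNat : Nat) : Int) := by omega
      have h2 : PySem.List.pyGetD t mid 0 = t.getD mid.toNat 0 := by
        conv_lhs => rw [h1]
        rw [PySem.List.pyGetD_natCast]
      rw [h2]; simp [List.getD, hmlen]
    have hpw := List.pairwise_iff_getElem.mp hsorted
    rw [ubGo]
    simp only [dif_pos hlt, ← hmid]
    by_cases hc : PySem.List.pyGetD t mid 0 ≤ h_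
    · rw [if_pos hc]
      refine ubGo_eq t h_ (mid + 1) hi (by omega) (by omega) hhi hsorted ?_ hhigh
      intro j hj
      have hjlen : j < t.length := by omega
      have hjle : t[j] ≤ t[mid.toNat] := by
        rcases Nat.lt_or_ge j mid.toNat with hlt' | hge
        · exact hpw j mid.toNat hjlen hmlen hlt'
        · have : j = mid.toNat := by omega
          simp [this]
      have hg : t.getD j 0 = t[j] := by simp [List.getD, hjlen]
      rw [hg]
      exact hjle.trans (by rwa [hget] at hc)
    · rw [if_neg hc]
      refine ubGo_eq t h_ lo mid h0 (by omega) (by omega) hsorted hlow ?_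
      intro j hj hjlen
      have hmj : t[mid.toNat] ≤ t[j] := by
        rcases Nat.lt_or_ge mid.toNat j with hlt' | hge
        · exact hpw mid.toNat j hmlen hjlen hlt'
        · have : j = mid.toNat := by omega
          simp [this]
      have hg : t.getD j 0 = t[j] := by simp [List.getD, hjlen]
      rw [hg]
      have : h_ < t[mid.toNat] := by rw [hget] at hc; omega
      omega
  · -- lo = hi: countP = lo
    rw [ubGo]; simp only [dif_neg hlt]
    have heq : lo = hi := le_antisymm hle (not_lt.mp hlt)
    have hsplit : t = t.take lo.toNat ++ t.drop lo.toNat := (List.take_append_drop _ t).symm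
    have hlen : (t.take lo.toNat).length = lo.toNat := by
      simp [List.length_take]; omega
    have hall : ∀ x ∈ t.take lo.toNat, (fun x => decide (x ≤ h_)) x = true := by
      intro x hx
      obtain ⟨j, hj, hxj⟩ := List.getElem_of_mem hx
      have hjlt : j < lo.toNat := by
        have := hj; simp [List.length_take] at this; omega
      have hjlen : j < t.length := by omega
      have hgt : (t.take lo.toNat)[j] = t[j] := List.getElem_take
      have hx' : x = t[j] := by rw [← hxj, hgt]
      have := hlow j hjlt
      simp [List.getD, hjlen] at this
      simp [hx', this]
    have hcount1 : (t.take lo.toNat).countP (fun x => decide (x ≤ h_)) = lo.toNat :=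
      (List.countP_eq_length.mpr hall).trans hlen
    have hcount2 : (t.drop lo.toNat).countP (fun x => decide (x ≤ h_)) = 0 := by
      apply List.countP_eq_zero.mpr
      intro x hx
      obtain ⟨j, hj, hxj⟩ := List.getElem_of_mem hx
      have hjlen : lo.toNat + j < t.length := by
        have := hj; simp [List.length_drop] at this; omega
      have hgt : (t.drop lo.toNat)[j] = t[lo.toNat + j] := by
        rw [List.getElem_drop]
      have hx' : x = t[lo.toNat + j] := by rw [← hxj, hgt]
      have := hhigh (lo.toNat + j) (by omega) hjlen
      simp [List.getD, hjlen] at this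
      simp [hx']; omega
    have hcnt : t.countP (fun x => decide (x ≤ h_)) = lo.toNat := by
      conv_lhs => rw [hsplit]
      rw [List.countP_append, hcount1, hcount2]
      omega
    rw [hcnt]; omega
termination_by (hi - lo).toNat
decreasing_by
  · have hm2 : PySem.Int.floordiv (lo + hi) 2 = (lo + hi) / 2 :=
      PySem.Int.floordiv_eq_ediv_of_pos (by omega)
    simp only [hm2]; omega
  · have hm2 : PySem.Int.floordiv (lo + hi) 2 = (lo + hi) / 2 :=
      PySem.Int.floordiv_eq_ediv_of_pos (by omega)
    simp only [hm2]; omega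

-- the generator 'arr[i] for i in range(n)' is the prefix arr.take n.toNat under Pre_
theorem map_pyGetD_prefix (arr : List Int) (n : Int) (hn : 0 ≤ n) (hle : n ≤ (arr.length : Int)) :
    (PySem.List.pyRange 0 n 1).map (fun i => PySem.List.pyGetD arr i 0) = arr.take n.toNat := by
  apply List.ext_getElem
  · simp [PySem.List.length_pyRange_one, List.length_take]; omega
  · intro k h1 h2
    have hk : k < n.toNat := by
      have := h1; simp [PySem.List.length_pyRange_one] at this; omega
    have hklen : k < arr.length := by omega
    have hr := PySem.List.getElem_pyRange_one 0 n k
      (by simpa [PySem.List.length_pyRange_one] using h1)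
    simp only [List.getElem_map, hr, zero_add]
    rw [PySem.List.pyGetD_natCast]
    simp [List.getD, hklen, List.getElem_take]

theorem findwidth_spec' (n : Int) (h_ : Int) (arr : List Int)
    (hpre : n ≤ (arr.length : Int)) : findwidth n h_ arr = findwidth_alt n h_ arr := by
  unfold findwidth findwidth_alt
  by_cases hn : n ≤ 0
  · rw [PySem.List.pyRange_one_eq_nil hn]
    simp [ubGo]
  · have h0 : 0 ≤ n := by omega
    have hmap := map_pyGetD_prefix arr n h0 hpre
    simp only [hmap]
    set p := arr.take n.toNat with hp
    set t := PySem.List.sorted p (fun x => x) false with ht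
    have hperm : t.Perm p := PySem.List.sorted_perm p (fun x => x) false
    have hlen : t.length = p.length := hperm.length_eq
    have hcnt : t.countP (fun x => decide (x ≤ h_)) = p.countP (fun x => decide (x ≤ h_)) :=
      hperm.countP_eq _
    have hsorted : t.Pairwise (· ≤ ·) := by
      simpa using PySem.List.sorted_pairwise p (fun x => x)
    have hub := ubGo_eq t h_ 0 (t.length : Int) le_rfl (by omega) le_rfl hsorted
      (by intro j hj; omega)
      (by intro j hj hjl; omega)
    have hloop := findwidth_loop_eq h_ arr n.toNat (by omega)
    have hcast : ((n.toNat : Nat) : Int) = n := by omega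
    rw [hcast] at hloop
    rw [hloop, hub, hcnt, hlen]

-- ===== VERDICT (by name: the statement is the Claim_ definition above) =====
theorem findwidth_spec : Claim_equal_findwidth := by
  intro n h_ arr _ hpre
  exact findwidth_spec' n h_ arr hpre
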